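-- pv_equiv track=rewrite | github.com/LucasLeculier/L3-info | atelier/atelier3/ex3/atelier3_ex3.py | outputStr
-- ===== SOURCE A (Python) =====
-- def outputStr(mot:str, lpos:list)-> str:
--     """
--     renvoie la chaine de de caractère correspondant au mot caché et aux lettres
--     trouvées
--
--     Parameters
--     ----------
--     mot : str
--         mot a cacher.
--     lpos : list
--         emplacement des caractères de mot a afficher.
--
--     Returns
--     -------
--     str
--         mot avec lpos affichées.
--     """
--     string = ''
--     for i in range (len(mot)):
--         if i in lpos:
--             string += mot[i]
--         else:
--             string += '_'
--     return string
-- ===== SOURCE B (Python) =====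
-- def outputStr(mot: str, lpos: list) -> str:
--     res = ['_'] * len(mot)
--     for p in lpos:
--         if 0 <= p < len(mot):
--             res[p] = mot[p]
--     return ''.join(res)
-- ===== Notes on version B (the rewrite author's own statement) =====
-- stated objective: faster
-- what changed: Replaces the per-index scan with an 'i in lpos' membership test by a '_'-filled buffer that is scatter-written once per position in lpos and joined.
import Mathlib
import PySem

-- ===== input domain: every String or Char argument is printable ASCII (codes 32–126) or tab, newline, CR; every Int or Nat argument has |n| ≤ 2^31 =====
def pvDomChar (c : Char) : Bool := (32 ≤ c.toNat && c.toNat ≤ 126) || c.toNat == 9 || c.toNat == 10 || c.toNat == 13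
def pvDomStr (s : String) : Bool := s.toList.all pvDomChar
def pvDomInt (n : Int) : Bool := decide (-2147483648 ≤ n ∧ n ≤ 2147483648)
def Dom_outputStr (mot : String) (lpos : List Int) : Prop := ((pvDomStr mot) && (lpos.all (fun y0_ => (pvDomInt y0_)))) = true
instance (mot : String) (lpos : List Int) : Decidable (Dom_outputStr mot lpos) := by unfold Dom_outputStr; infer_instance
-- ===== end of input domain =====

-- B replaces A's per-index membership scan (O(n·m)) by a '_'-filled buffer scatter-written
-- once per position of lpos (O(n+m)); objective: faster.

-- ===== PORT A =====
-- A: string = ''; for i in range(len(mot)): string += mot[i] if i in lpos else '_'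
def outputStr (mot : String) (lpos : List Int) : String :=
  String.mk ((List.range mot.toList.length).foldl
    (fun s (i : Nat) => if (i : Int) ∈ lpos then s ++ [mot.toList.getD i '_'] else s ++ ['_']) [])

-- ===== PORT B =====
-- B: res = ['_']*len(mot); for p in lpos: if 0 <= p < len(mot): res[p] = mot[p]; return ''.join(res)
def outputStr_alt (mot : String) (lpos : List Int) : String :=
  String.mk (lpos.foldl
    (fun r p => if 0 ≤ p ∧ p < (mot.toList.length : Int)
                then r.set p.toNat (mot.toList.getD p.toNat '_') else r)
    (List.replicate mot.toList.length '_'))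

-- ===== PRECONDITION & SPEC =====
def Spec_outputStr (mot : String) (lpos : List Int) (out : String) : Prop := out = outputStr_alt mot lpos
instance (mot : String) (lpos : List Int) (out : String) : Decidable (Spec_outputStr mot lpos out) := by unfold Spec_outputStr; infer_instance

-- ===== CLAIM (what is proved, stated in full; the proofs are below) =====
def Claim_equal_outputStr : Prop := ∀ (mot : String) (lpos : List Int), Dom_outputStr mot lpos → Spec_outputStr mot lpos (outputStr mot lpos)

-- ===== LEMMAS AND PROOFS =====

-- A's accumulating loop is a map over the index range
theorem pv_foldl_append (f : Nat → Char) (l : List Nat) (acc : List Char) :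
    l.foldl (fun s i => s ++ [f i]) acc = acc ++ l.map f := by
  induction l generalizing acc with
  | nil => simp
  | cons a t ih => simp [List.foldl_cons, ih]

-- B's scatter loop: length is preserved and each cell holds mot[j] iff j ∈ lpos
theorem pv_scatter_len (cs : List Char) (lpos : List Int) (r : List Char) :
    (lpos.foldl
      (fun r p => if 0 ≤ p ∧ p < (cs.length : Int)
                  then r.set p.toNat (cs.getD p.toNat '_') else r) r).length = r.length := by
  induction lpos generalizing r with
  | nil => rfl
  | cons p t ih =>
    simp only [List.foldl_cons]
    split
    · rw [ih, List.length_set]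
    · rw [ih]

theorem pv_scatter_get (cs : List Char) (lpos : List Int) (r : List Char)
    (hr : r.length = cs.length) (j : Nat) (hj : j < cs.length) :
    (lpos.foldl
      (fun r p => if 0 ≤ p ∧ p < (cs.length : Int)
                  then r.set p.toNat (cs.getD p.toNat '_') else r) r)[j]?
      = if (j : Int) ∈ lpos then cs[j]? else r[j]? := by
  induction lpos generalizing r with
  | nil => simp
  | cons p t ih =>
    simp only [List.foldl_cons]
    by_cases hp : 0 ≤ p ∧ p < (cs.length : Int)
    · rw [if_pos hp]
      rw [ih _ (by simp [hr])]
      by_cases ht : (j : Int) ∈ t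
      · simp [ht, List.mem_cons]
      · by_cases hpj : p = (j : Int)
        · have hjm : (j : Int) ∈ p :: t := by simp [hpj]
          have hnt : p.toNat = j := by omega
          rw [if_neg ht, if_pos hjm, hnt]
          rw [List.getElem?_set_self (by omega)]
          simp [List.getD, List.getElem?_eq_getElem hj]
        · have hnm : (j : Int) ∉ p :: t := by
            simp only [List.mem_cons, not_or]
            exact ⟨fun h => hpj h.symm, ht⟩
          rw [if_neg ht, if_neg hnm]
          apply List.getElem?_set_ne
          omega
    · rw [if_neg hp]
      rw [ih _ hr]
      by_cases ht : (j : Int) ∈ t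
      · simp [ht, List.mem_cons]
      · have hpj : p ≠ (j : Int) := by omega
        have hnm : (j : Int) ∉ p :: t := by
          simp only [List.mem_cons, not_or]
          exact ⟨fun h => hpj h.symm, ht⟩
        simp [ht, hnm]

-- ===== VERDICT (by name: the statement is the Claim_ definition above) =====
theorem outputStr_spec : Claim_equal_outputStr := by
  intro mot lpos _
  unfold Spec_outputStr outputStr outputStr_alt
  congr 1
  have hstep : (fun (s : List Char) (i : Nat) =>
      if (i : Int) ∈ lpos then s ++ [mot.toList.getD i '_'] else s ++ ['_'])
      = (fun s (i : Nat) => s ++ [if (i : Int) ∈ lpos then mot.toList.getD i '_' else '_']) := by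
    funext s i; split <;> rfl
  rw [hstep, pv_foldl_append]
  apply List.ext_getElem?
  intro j
  by_cases hj : j < mot.toList.length
  · rw [pv_scatter_get mot.toList lpos _ (by simp) j hj]
    simp only [List.nil_append]
    rw [List.getElem?_map, List.getElem?_range hj]
    simp only [Option.map_some]
    split
    · rw [List.getElem?_eq_getElem hj]
      simp [List.getD, List.getElem?_eq_getElem hj]
    · rw [List.getElem?_replicate, if_pos hj]
  · have h1 : ([] ++ (List.range mot.toList.length).map
        (fun (i : Nat) => if (i : Int) ∈ lpos then mot.toList.getD i '_' else '_')).length ≤ j := by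
      simp only [List.nil_append, List.length_map, List.length_range]; omega
    have h2 : ((lpos.foldl
        (fun r p => if 0 ≤ p ∧ p < (mot.toList.length : Int)
                    then r.set p.toNat (mot.toList.getD p.toNat '_') else r)
        (List.replicate mot.toList.length '_'))).length ≤ j := by
      rw [pv_scatter_len, List.length_replicate]; omega
    rw [List.getElem?_eq_none h1, List.getElem?_eq_none h2]
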